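-- pv_equiv track=rewrite | github.com/Issakafadil/Dissertation | TemporalInformationContent.py | calculate_event_frequencies
-- ===== SOURCE A (Python) =====
-- def calculate_event_frequencies(event_log):
--     # Example implementation: calculate the frequencies of events in the event log
--     event_frequencies = {}
--     for event in event_log:
--         if event in event_frequencies:
--             event_frequencies[event] += 1
--         else:
--             event_frequencies[event] = 1
--     return event_frequencies
-- ===== SOURCE B (Python) =====
-- def calculate_event_frequencies(event_log):
--     # Count by rescanning: one .count pass per distinct event, in first-occurrence order.
--     return {event: event_log.count(event) for event in dict.fromkeys(event_log)}
-- ===== Notes on version B (the rewrite author's own statement) =====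
-- stated objective: idiomatic
-- what changed: Replaced the incremental dict-accumulation loop by a dict comprehension over the distinct events (first-occurrence order) with a .count scan per distinct event.
import Mathlib
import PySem

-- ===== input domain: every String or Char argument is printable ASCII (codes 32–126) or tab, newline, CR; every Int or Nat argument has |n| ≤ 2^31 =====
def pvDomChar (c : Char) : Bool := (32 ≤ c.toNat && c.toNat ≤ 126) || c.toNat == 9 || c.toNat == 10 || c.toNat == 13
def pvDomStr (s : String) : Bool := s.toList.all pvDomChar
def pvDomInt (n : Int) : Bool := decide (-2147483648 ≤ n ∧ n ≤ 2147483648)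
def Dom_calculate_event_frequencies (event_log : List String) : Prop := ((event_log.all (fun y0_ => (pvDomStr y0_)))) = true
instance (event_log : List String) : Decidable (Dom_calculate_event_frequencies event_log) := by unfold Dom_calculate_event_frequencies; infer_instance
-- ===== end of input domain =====

-- B replaces A's incremental accumulation loop by a per-distinct-event counting scan (idiomatic, same values).

-- ===== PORT A =====
def calculate_event_frequencies (event_log : List String) : List (String × Int) :=
  (event_log.foldl
    (fun event_frequencies event =>
      if event_frequencies.contains event then
        event_frequencies.modify event 0 (· + 1)
      else
        event_frequencies.insert event 1)
    (PySem.Dict.empty : PySem.Dict String Int)).items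

-- ===== PORT B =====
def calculate_event_frequencies_alt (event_log : List String) : List (String × Int) :=
  (PySem.List.dedup event_log).map (fun event => (event, (event_log.count event : Int)))

-- ===== PRECONDITION & SPEC =====
def Spec_calculate_event_frequencies (event_log : List String) (out : List (String × Int)) : Prop := out = calculate_event_frequencies_alt event_log
instance (event_log : List String) (out : List (String × Int)) : Decidable (Spec_calculate_event_frequencies event_log out) := by unfold Spec_calculate_event_frequencies; infer_instance

-- ===== CLAIM (what is proved, stated in full; the proofs are below) =====
def Claim_equal_calculate_event_frequencies : Prop := ∀ (event_log : List String), Dom_calculate_event_frequencies event_log → Spec_calculate_event_frequencies event_log (calculate_event_frequencies event_log)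

-- ===== LEMMAS AND PROOFS =====

-- A's loop body ('if present then += 1 else = 1') is exactly d.modify event 0 (· + 1).
theorem pv_step_eq (d : PySem.Dict String Int) (e : String) :
    (if d.contains e then d.modify e 0 (· + 1) else d.insert e 1) = d.modify e 0 (· + 1) := by
  by_cases h : d.contains e = true
  · simp [h]
  · have hc : d.contains e = false := by simpa using h
    have hg : d.getD e 0 = 0 := by
      have := (PySem.Dict.get?_eq_none_iff_contains (d := d) (k := e)).mpr hc
      simp [PySem.Dict.getD, this]
    simp [h, PySem.Dict.modify, PySem.Dict.insert, hg]

-- ===== VERDICT (by name: the statement is the Claim_ definition above) =====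
theorem calculate_event_frequencies_spec : Claim_equal_calculate_event_frequencies := by
  intro event_log _
  unfold Spec_calculate_event_frequencies calculate_event_frequencies calculate_event_frequencies_alt
  have : (fun (d : PySem.Dict String Int) (e : String) =>
      if d.contains e then d.modify e 0 (· + 1) else d.insert e 1) =
      (fun d e => d.modify e 0 (· + 1)) := by
    funext d e; exact pv_step_eq d e
  rw [this, ← PySem.Dict.counter_eq_foldl, PySem.Dict.items_counter, PySem.List.dedup_eq_ofList]
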